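-- pv_equiv track=rewrite | github.com/suno09/QuranAnalytics | transliteration.py | normalize_text_latin
-- ===== SOURCE A (Python) =====
-- buckWalterSansTashkil = ["'", "|", ">", "&", "<", "}", "A", "b", "p", "t", "v",
--                          "j", "H", "x", "d", "*", "r",
--                          "z", "s", "$", "S", "D", "T", "Z", "E", "g", "_", "f",
--                          "q", "k", "l", "m", "n", "h",
--                          "w", "Y", "y", "{"]
--
-- def normalize_text_latin(text_latin):
--     """
--     remove diacritics if the text contains them
--     :param text_latin: text in latin letter
--     :return: latin text without diacritics letters
--     """
--     text_without_tashkil = ' '.join(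
--         [''.join([letter for letter in word if letter in buckWalterSansTashkil])
--          for word in text_latin.split()])
--     text = ""
--     for letter in text_without_tashkil:
--         # if you find "Alif + Maddah" or
--         # "Alif + HamzatWasl" then you have to put "Alif"
--         if letter in ["|", "{"]:
--             letter = "A"
--         text += letter
--
--     return text
-- ===== SOURCE B (Python) =====
-- _KEEP = frozenset("'|>&<}AbptvjHxd*rzs$SDTZEg_fqklmnhwYy{")
--
-- def normalize_text_latin(text_latin):
--     """
--     remove diacritics if the text contains them
--     :param text_latin: text in latin letter
--     :return: latin text without diacritics letters
--     """
--     words = []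
--     for word in text_latin.split():
--         cleaned = []
--         for ch in word:
--             if ch == '|' or ch == '{':
--                 cleaned.append('A')
--             elif ch in _KEEP:
--                 cleaned.append(ch)
--         words.append(''.join(cleaned))
--     return ' '.join(words)
-- ===== Notes on version B (the rewrite author's own statement) =====
-- stated objective: faster
-- what changed: Replaces A's two full passes (filter every word, join, then a second replace pass that rebuilds the whole string character by character with repeated string concatenation) with a single per-character pass per word that emits the normalized alif for the two maddah/hamzat-wasl codes, keeps allowed characters via one frozenset test instead of a 38-element list scan, and drops the rest.
import Mathlib
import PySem

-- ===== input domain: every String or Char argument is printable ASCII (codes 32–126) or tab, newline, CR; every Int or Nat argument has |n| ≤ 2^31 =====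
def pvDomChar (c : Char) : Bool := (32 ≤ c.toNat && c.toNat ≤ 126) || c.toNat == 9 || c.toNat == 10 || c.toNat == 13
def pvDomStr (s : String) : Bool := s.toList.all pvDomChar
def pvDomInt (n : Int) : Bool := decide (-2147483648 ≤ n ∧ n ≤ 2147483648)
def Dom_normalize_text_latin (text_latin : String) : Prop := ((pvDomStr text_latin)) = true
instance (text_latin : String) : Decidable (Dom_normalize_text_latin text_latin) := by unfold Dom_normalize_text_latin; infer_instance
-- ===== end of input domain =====

-- B collapses A's two passes (filter every word, join, then a replace pass rebuilding the whole
-- string by repeated concatenation) into a single per-character pass per word; same return value everywhere.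

-- ===== PORT A =====
-- buckWalterSansTashkil, as a list of characters (every Python element is a 1-char string)
def buckWalterSansTashkil : List Char :=
  ['\'', '|', '>', '&', '<', '}', 'A', 'b', 'p', 't', 'v',
   'j', 'H', 'x', 'd', '*', 'r',
   'z', 's', '$', 'S', 'D', 'T', 'Z', 'E', 'g', '_', 'f',
   'q', 'k', 'l', 'm', 'n', 'h',
   'w', 'Y', 'y', '{']

def normalize_text_latin (text_latin : String) : String :=
  let text_without_tashkil : String :=
    PySem.Str.join " "
      ((PySem.Str.split₀ text_latin).map
        (fun word => String.ofList (word.toList.filter (fun letter => letter ∈ buckWalterSansTashkil))))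
  String.ofList
    (text_without_tashkil.toList.foldl
      (fun text letter =>
        let letter := if letter ∈ ['|', '{'] then 'A' else letter
        text ++ [letter])
      [])

-- ===== PORT B =====
-- the frozenset _KEEP built from B's string literal
def pvKeep : PySem.Set Char := PySem.Set.ofList "'|>&<}AbptvjHxd*rzs$SDTZEg_fqklmnhwYy{".toList

def normalize_text_latin_alt (text_latin : String) : String :=
  PySem.Str.join " "
    ((PySem.Str.split₀ text_latin).map
      (fun word => String.ofList
        (word.toList.filterMap
          (fun ch =>
            if ch = '|' ∨ ch = '{' then some 'A'
            else if PySem.Set.contains pvKeep ch then some ch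
            else none))))

-- ===== PRECONDITION & SPEC =====
def Spec_normalize_text_latin (text_latin : String) (out : String) : Prop := out = normalize_text_latin_alt text_latin
instance (text_latin : String) (out : String) : Decidable (Spec_normalize_text_latin text_latin out) := by unfold Spec_normalize_text_latin; infer_instance

-- ===== CLAIM (what is proved, stated in full; the proofs are below) =====
def Claim_equal_normalize_text_latin : Prop := ∀ (text_latin : String), Dom_normalize_text_latin text_latin → Spec_normalize_text_latin text_latin (normalize_text_latin text_latin)

-- ===== LEMMAS AND PROOFS =====

-- the replacement A's second pass applies to each character
def pvRepl (c : Char) : Char := if c ∈ ['|', '{'] then 'A' else c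

-- B's one-pass step
def pvStep (c : Char) : Option Char :=
  if c = '|' ∨ c = '{' then some 'A'
  else if PySem.Set.contains pvKeep c then some c
  else none

theorem pvKeep_eq : pvKeep = buckWalterSansTashkil := by decide

-- per word: A's filter-then-replace equals B's single filterMap pass
theorem pv_word (w : List Char) :
    (w.filter (fun c => decide (c ∈ buckWalterSansTashkil))).map pvRepl = w.filterMap pvStep := by
  induction w with
  | nil => rfl
  | cons c cs ih =>
    by_cases hs : c = '|' ∨ c = '{'
    · have hmem : c ∈ buckWalterSansTashkil := by rcases hs with h | h <;> subst h <;> decide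
      have hr : pvRepl c = 'A' := by rcases hs with h | h <;> subst h <;> rfl
      simp [hmem, pvStep, hs, hr, ih]
    · have hr : pvRepl c = c := by
        unfold pvRepl
        rw [if_neg]
        simpa using hs
      by_cases hmem : c ∈ buckWalterSansTashkil
      · have hIn : c ∈ pvKeep := by rw [pvKeep_eq]; exact hmem
        simp [hmem, pvStep, hs, hr, ih, hIn]
      · have hNotIn : c ∉ pvKeep := by rw [pvKeep_eq]; exact hmem
        simp [hmem, pvStep, hs, ih, hNotIn]

-- pvRepl fixes the separator, so it distributes over intersperse/intercalate
theorem pv_map_intersperse (sep : List Char) (ls : List (List Char)) :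
    (List.intersperse sep ls).map (List.map pvRepl)
      = List.intersperse (sep.map pvRepl) (ls.map (List.map pvRepl)) := by
  induction ls with
  | nil => rfl
  | cons a tl ih =>
    cases tl with
    | nil => rfl
    | cons b tl2 => simp_all [List.intersperse_cons₂]

theorem pv_map_intercalate (ls : List (List Char)) :
    (List.intercalate [' '] ls).map pvRepl = List.intercalate [' '] (ls.map (List.map pvRepl)) := by
  have hsep : [' '].map pvRepl = [' '] := by decide
  simp [List.intercalate, List.map_flatten, pv_map_intersperse, hsep]

-- ===== VERDICT (by name: the statement is the Claim_ definition above) =====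
theorem normalize_text_latin_spec : Claim_equal_normalize_text_latin := by
  intro t _
  unfold Spec_normalize_text_latin normalize_text_latin normalize_text_latin_alt
  apply String.ext
  simp only [PySem.List.foldl_append_singleton_eq_map, PySem.Str.toList_join,
    PySem.Chars.join, List.nil_append, String.toList_ofList, List.map_map]
  have h1 : (fun x : Char => if x ∈ ['|', '{'] then 'A' else x) = pvRepl := rfl
  have h2 : " ".toList = [' '] := rfl
  rw [h1, h2, pv_map_intercalate, List.map_map]
  congr 1
  apply List.map_congr_left
  intro w _
  simpa [pvStep, Function.comp] using pv_word w.toList
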